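-- pv_equiv track=rewrite | github.com/chaffeechenyefei/market_intelligence_airflow_dags | dnb/utils.py | list2str_and
-- ===== SOURCE A (Python) =====
-- def list2str_and(List:list,delimeter = ', ',backend = '')->str:
--     """
--     list2str
--     :param List: input list
--     :param backend: define the end of line '\n','.'
--     :return: string of list with ',' as split
--     """
--     res = ''
--     L = len(List)
--     L2 = L - 2
--
--     for i,ele in enumerate(List):
--         if i == L2:
--             res+= str(ele) + ' and '
--         elif i == L-1:
--             res += str(ele)
--         else:
--             res += str(ele) + delimeter
--
--     return res+backend if res else res
-- ===== SOURCE B (Python) =====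
-- def list2str_and(List, delimeter=', ', backend=''):
--     parts = [str(e) for e in List]
--     if not parts:
--         res = ''
--     elif len(parts) == 1:
--         res = parts[0]
--     else:
--         res = delimeter.join(parts[:-1]) + ' and ' + parts[-1]
--     return res + backend if res else res
-- ===== Notes on version B (the rewrite author's own statement) =====
-- stated objective: simpler
-- what changed: Replaces the per-index three-way conditional accumulation loop by a branch on list length with a join over all-but-the-last element plus ' and ' plus the last element, keeping the truthiness-guarded backend append.
import Mathlib
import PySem

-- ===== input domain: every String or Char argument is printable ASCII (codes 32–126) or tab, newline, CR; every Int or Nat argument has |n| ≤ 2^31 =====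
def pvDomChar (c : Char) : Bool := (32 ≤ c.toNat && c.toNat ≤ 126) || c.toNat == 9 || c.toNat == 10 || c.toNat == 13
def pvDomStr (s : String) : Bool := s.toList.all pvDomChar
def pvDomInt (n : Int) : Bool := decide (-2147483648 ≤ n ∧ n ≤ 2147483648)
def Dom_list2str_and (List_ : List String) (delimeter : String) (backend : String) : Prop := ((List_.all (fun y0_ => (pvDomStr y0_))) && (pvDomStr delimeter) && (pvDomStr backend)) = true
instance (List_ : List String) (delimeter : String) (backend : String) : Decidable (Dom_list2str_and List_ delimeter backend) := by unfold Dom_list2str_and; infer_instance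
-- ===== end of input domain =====

-- B replaces A's per-index three-way conditional single pass by a length branch plus
-- join-over-slice decomposition (objective: simpler); return values proved equal on all inputs.

-- ===== PORT A =====
-- literal port of A: enumerate loop with the three positional branches, then the
-- truthiness-guarded '+ backend'
def list2str_and (List_ : List String) (delimeter : String) (backend : String) : String :=
  let L : Int := List_.length
  let L2 : Int := L - 2
  let res := (PySem.List.enumerate List_ 0).foldl
    (fun res p =>
      if p.1 = L2 then res ++ p.2 ++ " and "
      else if p.1 = L - 1 then res ++ p.2
      else res ++ p.2 ++ delimeter) ""
  if res ≠ "" then res ++ backend else res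

-- ===== PORT B =====
-- literal port of Source B: length branch; parts[0] / parts[-1] are in range in their
-- branches, ported as pyGetD with an unreachable default
def list2str_and_alt (List_ : List String) (delimeter : String) (backend : String) : String :=
  let parts := List_.map (fun e => e)
  let res :=
    if parts = [] then ""
    else if parts.length = 1 then PySem.List.pyGetD parts 0 ""
    else PySem.Str.join delimeter (PySem.List.slice parts none (some (-1))) ++ " and "
         ++ PySem.List.pyGetD parts (-1) ""
  if res ≠ "" then res ++ backend else res

-- ===== PRECONDITION & SPEC =====
def Spec_list2str_and (List_ : List String) (delimeter : String) (backend : String) (out : String) : Prop := out = list2str_and_alt List_ delimeter backend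
instance (List_ : List String) (delimeter : String) (backend : String) (out : String) : Decidable (Spec_list2str_and List_ delimeter backend out) := by unfold Spec_list2str_and; infer_instance

-- ===== CLAIM (what is proved, stated in full; the proofs are below) =====
def Claim_equal_list2str_and : Prop := ∀ (List_ : List String) (delimeter : String) (backend : String), Dom_list2str_and List_ delimeter backend → Spec_list2str_and List_ delimeter backend (list2str_and List_ delimeter backend)

-- ===== LEMMAS AND PROOFS =====

-- A's loop over a suffix xs starting at index s (with s + |xs| = n, |xs| ≥ 2) renders
-- 'join of all but the last, then " and ", then the last'.
theorem list2str_and_loop (n : Int) (d : String) :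
    ∀ (xs : List String) (s : Int) (acc : String) (hne : xs ≠ []),
      s + xs.length = n → 2 ≤ xs.length →
      ((PySem.List.enumerate xs s).foldl
        (fun res p =>
          if p.1 = n - 2 then res ++ p.2 ++ " and "
          else if p.1 = n - 1 then res ++ p.2
          else res ++ p.2 ++ d) acc).toList =
      acc.toList ++ PySem.Chars.join d.toList (xs.dropLast.map String.toList)
        ++ (" and " : String).toList ++ (xs.getLast hne).toList := by
  intro xs
  induction xs with
  | nil => intro s acc hne; simp at hne
  | cons x rest ih =>
    intro s acc hne hsum hlen
    match rest with
    | [] => simp at hlen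
    | y :: rest' =>
      rw [PySem.List.enumerate_cons, List.foldl_cons]
      match rest' with
      | [] =>
        -- xs = [x, y] : x takes the ' and ' branch, y the last-element branch
        have hs : s = n - 2 := by simp at hsum; omega
        rw [PySem.List.enumerate_cons, PySem.List.enumerate_nil]
        simp only [hs, List.foldl_cons, List.foldl_nil]
        have h1 : ¬ (n - 2 + 1 = n - 2) := by omega
        have h2 : n - 2 + 1 = n - 1 := by omega
        simp [h2, List.getLast, String.toList_append]
      | z :: rest'' =>
        -- at least three left: x takes the delimiter branch
        have h1 : ¬ (s = n - 2) := by simp at hsum; omega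
        have h2 : ¬ (s = n - 1) := by simp at hsum; omega
        rw [if_neg h1, if_neg h2]
        have hsum' : (s + 1) + ((y :: z :: rest'').length : Int) = n := by
          simp at hsum ⊢; omega
        have := ih (s + 1) (acc ++ x ++ d) (by simp) hsum' (by simp)
        rw [this]
        have hgl : (x :: y :: z :: rest'').getLast hne
            = (y :: z :: rest'').getLast (by simp) := by
          simp [List.getLast]
        rw [hgl]
        have hdl : (x :: y :: z :: rest'').dropLast = x :: (y :: z :: rest'').dropLast := by
          simp
        rw [hdl]
        have hdl2 : (y :: z :: rest'').dropLast = y :: (z :: rest'').dropLast := by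
          simp
        rw [hdl2]
        simp [List.map_cons, PySem.Chars.join_cons_cons, String.toList_append]

theorem list2str_and_res_eq (List_ : List String) (delimeter : String) :
    ((PySem.List.enumerate List_ 0).foldl
        (fun res p =>
          if p.1 = (List_.length : Int) - 2 then res ++ p.2 ++ " and "
          else if p.1 = (List_.length : Int) - 1 then res ++ p.2
          else res ++ p.2 ++ delimeter) "")
    = (if List_.map (fun e => e) = [] then ""
       else if (List_.map (fun e => e)).length = 1 then PySem.List.pyGetD (List_.map (fun e => e)) 0 ""
       else PySem.Str.join delimeter (PySem.List.slice (List_.map (fun e => e)) none (some (-1))) ++ " and "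
            ++ PySem.List.pyGetD (List_.map (fun e => e)) (-1) "") := by
  match List_ with
  | [] => simp [PySem.List.enumerate_nil]
  | [x] =>
    rw [PySem.List.enumerate_cons, PySem.List.enumerate_nil]
    norm_num [PySem.List.pyGetD_zero_cons]
  | x :: y :: rest =>
    apply String.toList_inj.mp
    have hne : (x :: y :: rest) ≠ [] := by simp
    rw [list2str_and_loop ((x :: y :: rest).length : Int) delimeter (x :: y :: rest) 0 "" hne
        (by simp) (by simp)]
    have hmap : (x :: y :: rest).map (fun e => e) = x :: y :: rest := by simp
    rw [hmap]
    have hlen : ¬ ((x :: y :: rest).length = 1) := by simp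
    rw [if_neg (by simp), if_neg hlen, PySem.List.slice_to_neg_one,
        PySem.List.pyGetD_neg_one _ _ hne]
    simp [String.toList_append, PySem.Str.toList_join]

-- ===== VERDICT (by name: the statement is the Claim_ definition above) =====
theorem list2str_and_spec : Claim_equal_list2str_and := by
  intro List_ delimeter backend _
  unfold Spec_list2str_and list2str_and list2str_and_alt
  simp only []
  rw [list2str_and_res_eq List_ delimeter]
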